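-- pv_equiv track=rewrite | github.com/Special-K-s-Flightsim-Bots/DCSServerBot | core/utils/dcs.py | lua_pattern_to_python_regex
-- ===== SOURCE A (Python) =====
-- def lua_pattern_to_python_regex(lua_pattern):
--     translation_dict = {
--         '%a': '[a-zA-Z]',
--         '%c': '[\\x00-\\x1f\\x7f]',
--         '%d': '\\d',
--         '%l': '[a-z]',
--         '%u': '[A-Z]',
--         '%w': '\\w',
--         '%x': '[a-fA-F0-9]',
--         '%p': '[-!\\"#$%&\'()*+,./:;<=>?@[\\\\\\]^_`{|}~]',
--         '%s': '\\s',
--         '%z': '\\x00',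
--     }
--
--     python_regex = lua_pattern
--     for lua, python in translation_dict.items():
--         python_regex = python_regex.replace(lua, python)
--
--     return python_regex
-- ===== SOURCE B (Python) =====
-- def lua_pattern_to_python_regex(lua_pattern):
--     class_dict = {
--         'a': '[a-zA-Z]',
--         'c': r'[\x00-\x1f\x7f]',
--         'd': r'\d',
--         'l': '[a-z]',
--         'u': '[A-Z]',
--         'w': r'\w',
--         'x': '[a-fA-F0-9]',
--         'p': r"[-!\"#$%&'()*+,./:;<=>?@[\\\]^_`{|}~]",
--         's': r'\s',
--         'z': r'\x00',
--     }
--     out = []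
--     i, n = 0, len(lua_pattern)
--     while i < n:
--         if lua_pattern[i] == '%' and i + 1 < n and lua_pattern[i + 1] in class_dict:
--             out.append(class_dict[lua_pattern[i + 1]])
--             i += 2
--         else:
--             out.append(lua_pattern[i])
--             i += 1
--     return ''.join(out)
-- ===== Notes on version B (the rewrite author's own statement) =====
-- stated objective: alternative
-- what changed: Replaced A's ten sequential full-string str.replace passes (one per Lua character class) with a single left-to-right scan that translates each two-character percent escape via one dict lookup keyed by the class letter.
import Mathlib
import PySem

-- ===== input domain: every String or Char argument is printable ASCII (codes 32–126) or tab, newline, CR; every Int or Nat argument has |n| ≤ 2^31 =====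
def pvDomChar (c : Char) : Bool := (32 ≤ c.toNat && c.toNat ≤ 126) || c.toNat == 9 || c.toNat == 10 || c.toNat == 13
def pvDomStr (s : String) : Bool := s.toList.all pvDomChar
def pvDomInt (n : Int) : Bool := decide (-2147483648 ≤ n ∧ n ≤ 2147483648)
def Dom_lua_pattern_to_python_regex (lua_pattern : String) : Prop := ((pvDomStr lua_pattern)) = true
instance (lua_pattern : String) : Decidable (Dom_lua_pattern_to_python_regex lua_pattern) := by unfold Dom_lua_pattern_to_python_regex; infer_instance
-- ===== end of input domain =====

-- B replaces A's ten sequential full-string replace passes by a single left-to-right scan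
-- that maps each "%<class>" escape via one dict lookup (objective: alternative single-pass algorithm).

-- ===== PORT A =====
def lua_pattern_to_python_regex (lua_pattern : String) : String :=
  let translation_dict : PySem.Dict String String := PySem.Dict.ofList [
    ("%a", "[a-zA-Z]"),
    ("%c", "[\\x00-\\x1f\\x7f]"),
    ("%d", "\\d"),
    ("%l", "[a-z]"),
    ("%u", "[A-Z]"),
    ("%w", "\\w"),
    ("%x", "[a-fA-F0-9]"),
    ("%p", "[-!\\\"#$%&'()*+,./:;<=>?@[\\\\\\]^_`{|}~]"),
    ("%s", "\\s"),
    ("%z", "\\x00")]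
  -- for lua, python in translation_dict.items(): python_regex = python_regex.replace(lua, python)
  translation_dict.items.foldl
    (fun python_regex p => PySem.Str.replace python_regex p.1 p.2) lua_pattern

-- ===== PORT B =====
def pvTdictB : PySem.Dict String String := PySem.Dict.ofList [
    ("a", "[a-zA-Z]"),
    ("c", "[\\x00-\\x1f\\x7f]"),
    ("d", "\\d"),
    ("l", "[a-z]"),
    ("u", "[A-Z]"),
    ("w", "\\w"),
    ("x", "[a-fA-F0-9]"),
    ("p", "[-!\\\"#$%&'()*+,./:;<=>?@[\\\\\\]^_`{|}~]"),
    ("s", "\\s"),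
    ("z", "\\x00")]

-- the while loop of Source B: emit the translation of s[i+1] after a '%' (advance 2) or s[i] itself (advance 1)
def pvScanB (d : PySem.Dict String String) : List Char → List Char
  | [] => []
  | [c] => [c]
  | c :: c2 :: rest =>
    if c = '%' then
      match d.get? (String.ofList [c2]) with
      | some v => v.toList ++ pvScanB d rest
      | none => c :: pvScanB d (c2 :: rest)
    else c :: pvScanB d (c2 :: rest)

def lua_pattern_to_python_regex_alt (lua_pattern : String) : String :=
  String.ofList (pvScanB pvTdictB lua_pattern.toList)

-- ===== PRECONDITION & SPEC =====
def Spec_lua_pattern_to_python_regex (lua_pattern : String) (out : String) : Prop := out = lua_pattern_to_python_regex_alt lua_pattern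
instance (lua_pattern : String) (out : String) : Decidable (Spec_lua_pattern_to_python_regex lua_pattern out) := by unfold Spec_lua_pattern_to_python_regex; infer_instance

-- ===== CLAIM (what is proved, stated in full; the proofs are below) =====
def Claim_equal_lua_pattern_to_python_regex : Prop := ∀ (lua_pattern : String), Dom_lua_pattern_to_python_regex lua_pattern → Spec_lua_pattern_to_python_regex lua_pattern (lua_pattern_to_python_regex lua_pattern)

-- ===== LEMMAS AND PROOFS =====

-- `Chars.replace` for the two-character pattern ['%', k], as a plain structural scan
def pvRepC (k : Char) (r : List Char) : List Char → List Char
  | [] => []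
  | c :: t =>
    if c = '%' then
      match t with
      | [] => ['%']
      | d :: t' => if d = k then r ++ pvRepC k r t' else '%' :: pvRepC k r (d :: t')
    else c :: pvRepC k r t

theorem pvRepC_nil (k : Char) (r : List Char) : pvRepC k r [] = [] := by rw [pvRepC.eq_def]
theorem pvRepC_cons_ne (k : Char) (r : List Char) (c : Char) (t : List Char) (hc : c ≠ '%') :
    pvRepC k r (c :: t) = c :: pvRepC k r t := by rw [pvRepC.eq_def]; simp [hc]
theorem pvRepC_pct_nil (k : Char) (r : List Char) : pvRepC k r ['%'] = ['%'] := by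
  rw [pvRepC.eq_def]; simp
theorem pvRepC_match (k : Char) (r : List Char) (t : List Char) :
    pvRepC k r ('%' :: k :: t) = r ++ pvRepC k r t := by rw [pvRepC.eq_def]; simp
theorem pvRepC_pct_ne (k : Char) (r : List Char) (d : Char) (t : List Char) (hd : d ≠ k) :
    pvRepC k r ('%' :: d :: t) = '%' :: pvRepC k r (d :: t) := by rw [pvRepC.eq_def]; simp [hd]

theorem pvGo_eq (k : Char) (r : List Char) :
    ∀ fuel l acc, l.length ≤ fuel →
      PySem.Chars.replace.go ['%', k] r fuel l acc = acc.reverse ++ pvRepC k r l := by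
  intro fuel
  induction fuel with
  | zero => intro l acc h
            have : l = [] := List.length_eq_zero_iff.mp (Nat.le_zero.mp h)
            subst this; simp [PySem.Chars.replace.go, pvRepC_nil]
  | succ n ih =>
    intro l acc h
    match l with
    | [] => simp [PySem.Chars.replace.go, pvRepC_nil]
    | c :: t =>
      rw [PySem.Chars.replace.go]
      by_cases hpre : List.isPrefixOf ['%', k] (c :: t)
      · cases t with
        | nil => simp [List.isPrefixOf] at hpre
        | cons d t' =>
          have hp : '%' = c ∧ k = d := by simpa [List.isPrefixOf] using hpre
          obtain ⟨hc, hd⟩ := hp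
          subst hd
          cases hc
          simp only [hpre, if_true]
          rw [ih _ _ (by simp at h ⊢; omega)]
          simp [pvRepC_match]
      · simp only [hpre, if_false, Bool.false_eq_true]
        rw [ih _ _ (by simp at h ⊢; omega)]
        cases t with
        | nil =>
          by_cases hc : c = '%'
          · subst hc; simp [pvRepC_pct_nil, pvRepC_nil]
          · simp [pvRepC_cons_ne _ _ _ _ hc, pvRepC_nil]
        | cons d t' =>
          by_cases hc : c = '%'
          · subst hc
            have hd : d ≠ k := by
              intro hdk; subst hdk; simp [List.isPrefixOf] at hpre
            simp [pvRepC_pct_ne _ _ _ _ hd]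
          · simp [pvRepC_cons_ne _ _ _ _ hc]

theorem pvReplace_eq_repC (k : Char) (r s : List Char) :
    PySem.Chars.replace s ['%', k] r = pvRepC k r s := by
  rw [PySem.Chars.replace]
  simp only [List.isEmpty_cons, if_false, Bool.false_eq_true]
  exact pvGo_eq k r s.length s [] le_rfl

-- u is "inert" for pattern ['%', k]: every '%' in u is followed by a char that is neither k nor '%'
def pvGood (k : Char) : List Char → Bool
  | [] => true
  | c :: t =>
    if c = '%' then
      match t with
      | [] => false
      | d :: t' => decide (d ≠ k) && decide (d ≠ '%') && pvGood k t'
    else pvGood k t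

theorem pvRepC_append_good (k : Char) (r : List Char) :
    ∀ u, pvGood k u = true → ∀ y, pvRepC k r (u ++ y) = u ++ pvRepC k r y := by
  intro u
  induction u using pvGood.induct with
  | case1 => intro _ y; simp
  | case2 => intro hg; rw [pvGood.eq_def] at hg; simp at hg
  | case3 d t' ih =>
    intro hg y
    rw [pvGood.eq_def] at hg
    simp at hg
    obtain ⟨⟨hdk, hdp⟩, hg'⟩ := hg
    rw [List.cons_append, List.cons_append, pvRepC_pct_ne _ _ _ _ hdk,
        pvRepC_cons_ne _ _ _ _ hdp, ih hg' y]
    simp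
  | case4 c t hc ih =>
    intro hg y
    have hg' : pvGood k t = true := by rw [pvGood.eq_def] at hg; simpa [hc] using hg
    rw [List.cons_append, pvRepC_cons_ne _ _ _ _ hc, ih hg']; simp

-- the sequential passes of A, at the char-list level
def pvFF (L : List (Char × List Char)) (s : List Char) : List Char :=
  L.foldl (fun s p => pvRepC p.1 p.2 s) s

theorem pvFF_nil_input (L : List (Char × List Char)) : pvFF L [] = [] := by
  induction L with
  | nil => rfl
  | cons p L ih => simpa [pvFF, pvRepC_nil] using ih

theorem pvFF_cons_ne (L : List (Char × List Char)) (c : Char) (t : List Char) (hc : c ≠ '%') :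
    pvFF L (c :: t) = c :: pvFF L t := by
  induction L generalizing t with
  | nil => rfl
  | cons p L ih => simp only [pvFF, List.foldl_cons, pvRepC_cons_ne _ _ _ _ hc]; exact ih _

theorem pvFF_pct_nil (L : List (Char × List Char)) : pvFF L ['%'] = ['%'] := by
  induction L with
  | nil => rfl
  | cons p L ih => simpa [pvFF, pvRepC_pct_nil] using ih

theorem pvFF_pct_other (L : List (Char × List Char)) (d : Char) (hd : d ≠ '%') :
    ∀ t, (∀ p ∈ L, d ≠ p.1) → pvFF L ('%' :: d :: t) = '%' :: d :: pvFF L t := by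
  induction L with
  | nil => intro t _; rfl
  | cons p L ih =>
    intro t hkeys
    simp only [pvFF, List.foldl_cons,
      pvRepC_pct_ne p.1 p.2 d t (hkeys p List.mem_cons_self),
      pvRepC_cons_ne _ _ _ _ hd]
    exact ih _ (fun q hq => hkeys q (List.mem_cons_of_mem _ hq))

theorem pvFF_append_good (L : List (Char × List Char)) (u : List Char) :
    ∀ y, (∀ p ∈ L, pvGood p.1 u = true) → pvFF L (u ++ y) = u ++ pvFF L y := by
  induction L with
  | nil => intro y _; rfl
  | cons p L ih =>
    intro y hg
    simp only [pvFF, List.foldl_cons,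
      pvRepC_append_good p.1 p.2 u (hg p List.mem_cons_self) y]
    exact ih _ (fun q hq => hg q (List.mem_cons_of_mem _ hq))

theorem pvFF_match (L1 L2 : List (Char × List Char)) (k : Char) (r : List Char) (t : List Char)
    (hk : k ≠ '%')
    (h1 : ∀ p ∈ L1, k ≠ p.1)
    (hg : ∀ p ∈ L2, pvGood p.1 r = true) :
    pvFF (L1 ++ (k, r) :: L2) ('%' :: k :: t) = r ++ pvFF (L1 ++ (k, r) :: L2) t := by
  have happ : ∀ s, pvFF (L1 ++ (k, r) :: L2) s = pvFF L2 (pvRepC k r (pvFF L1 s)) := by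
    intro s; simp [pvFF, List.foldl_append]
  rw [happ, happ, pvFF_pct_other L1 k hk t h1, pvRepC_match, pvFF_append_good L2 r _ hg]

-- head of a single replace pass: either the input's head or the replacement's head
theorem pvRepC_head (k : Char) (r : List Char) (hr : r ≠ []) (X : List Char) :
    (pvRepC k r X).head? = X.head? ∨ (pvRepC k r X).head? = r.head? := by
  match X with
  | [] => left; rw [pvRepC_nil]
  | [c] =>
    by_cases hc : c = '%'
    · subst hc; left; rw [pvRepC_pct_nil]
    · left; rw [pvRepC_cons_ne _ _ _ _ hc]; simp
  | c :: d :: t =>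
    by_cases hc : c = '%'
    · subst hc
      by_cases hd : d = k
      · subst hd
        rw [pvRepC_match]
        obtain ⟨r0, r', rfl⟩ := List.exists_cons_of_ne_nil hr
        right; simp
      · left; rw [pvRepC_pct_ne _ _ _ _ hd]; simp
    · left; rw [pvRepC_cons_ne _ _ _ _ hc]; simp

theorem pvFF_pct_gen (L : List (Char × List Char)) (X : List Char)
    (hK : ∀ p ∈ L, p.1 ≠ '%')
    (hNE : ∀ p ∈ L, p.2 ≠ [])
    (hR : ∀ p ∈ L, ∀ c, p.2.head? = some c → c = '%' ∨ ∀ q ∈ L, c ≠ q.1)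
    (hHead : ∀ c, X.head? = some c → c = '%' ∨ ∀ p ∈ L, c ≠ p.1) :
    pvFF L ('%' :: X) = '%' :: pvFF L X := by
  induction L generalizing X with
  | nil => rfl
  | cons p L ih =>
    have hstep : pvRepC p.1 p.2 ('%' :: X) = '%' :: pvRepC p.1 p.2 X := by
      match X with
      | [] => rw [pvRepC_pct_nil, pvRepC_nil]
      | c :: t =>
        have hck : c ≠ p.1 := by
          rcases hHead c rfl with h | h
          · subst h; exact fun hh => hK p List.mem_cons_self hh.symm
          · exact h p List.mem_cons_self
        exact pvRepC_pct_ne _ _ _ _ hck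
    simp only [pvFF, List.foldl_cons, hstep]
    refine ih (pvRepC p.1 p.2 X) (fun q hq => hK q (List.mem_cons_of_mem _ hq))
      (fun q hq => hNE q (List.mem_cons_of_mem _ hq))
      (fun q hq c hqc => ?_) (fun c hc => ?_)
    · rcases hR q (List.mem_cons_of_mem _ hq) c hqc with h | h
      · exact Or.inl h
      · exact Or.inr fun q' hq' => h q' (List.mem_cons_of_mem _ hq')
    · rcases pvRepC_head p.1 p.2 (hNE p List.mem_cons_self) X with hh | hh
      · rcases hHead c (hh ▸ hc) with h | h
        · exact Or.inl h
        · exact Or.inr fun q hq => h q (List.mem_cons_of_mem _ hq)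
      · rcases hR p List.mem_cons_self c (hh ▸ hc) with h | h
        · exact Or.inl h
        · exact Or.inr fun q hq => h q (List.mem_cons_of_mem _ hq)

-- the ten translation pairs at the char-list level, in dict order
def pvPairs : List (Char × List Char) := [
    ('a', ['[','a','-','z','A','-','Z',']']),
    ('c', ['[','\\','x','0','0','-','\\','x','1','f','\\','x','7','f',']']),
    ('d', ['\\','d']),
    ('l', ['[','a','-','z',']']),
    ('u', ['[','A','-','Z',']']),
    ('w', ['\\','w']),
    ('x', ['[','a','-','f','A','-','F','0','-','9',']']),
    ('p', ['[','-','!','\\','"','#','$','%','&','\'','(',')','*','+',',','.','/',':',';','<','=','>','?','@','[','\\','\\','\\',']','^','_','`','{','|','}','~',']']),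
    ('s', ['\\','s']),
    ('z', ['\\','x','0','0'])]

theorem pvScan_pos (d : PySem.Dict String String) (c2 : Char) (rest : List Char) (v : String)
    (h : d.get? (String.ofList [c2]) = some v) :
    pvScanB d ('%' :: c2 :: rest) = v.toList ++ pvScanB d rest := by
  rw [pvScanB.eq_def]; simp [h]

theorem pvScan_neg (d : PySem.Dict String String) (c2 : Char) (rest : List Char)
    (h : d.get? (String.ofList [c2]) = none) :
    pvScanB d ('%' :: c2 :: rest) = '%' :: pvScanB d (c2 :: rest) := by
  rw [pvScanB.eq_def]; simp [h]

theorem pvScan_cons_ne (d : PySem.Dict String String) (c : Char) (rest : List Char)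
    (hc : c ≠ '%') :
    pvScanB d (c :: rest) = c :: pvScanB d rest := by
  match rest with
  | [] => rfl
  | c2 :: rest' => rw [pvScanB.eq_def]; simp [hc]

-- lookup in the literal dict, for a symbolic second char outside the ten classes
theorem pvGet_none (c2 : Char)
    (h : c2 ≠ 'a' ∧ c2 ≠ 'c' ∧ c2 ≠ 'd' ∧ c2 ≠ 'l' ∧ c2 ≠ 'u' ∧ c2 ≠ 'w' ∧ c2 ≠ 'x' ∧
         c2 ≠ 'p' ∧ c2 ≠ 's' ∧ c2 ≠ 'z') :
    pvTdictB.get? (String.ofList [c2]) = none := by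
  obtain ⟨h1, h2, h3, h4, h5, h6, h7, h8, h9, h10⟩ := h
  rw [show pvTdictB = PySem.Dict.mk [
    (String.ofList ['a'], "[a-zA-Z]"),
    (String.ofList ['c'], "[\\x00-\\x1f\\x7f]"),
    (String.ofList ['d'], "\\d"),
    (String.ofList ['l'], "[a-z]"),
    (String.ofList ['u'], "[A-Z]"),
    (String.ofList ['w'], "\\w"),
    (String.ofList ['x'], "[a-fA-F0-9]"),
    (String.ofList ['p'], "[-!\\\"#$%&'()*+,./:;<=>?@[\\\\\\]^_`{|}~]"),
    (String.ofList ['s'], "\\s"),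
    (String.ofList ['z'], "\\x00")] from rfl]
  simp only [PySem.Dict.get?_mk_cons, beq_iff_eq, String.ofList_inj]
  simp [h1.symm, h2.symm, h3.symm, h4.symm, h5.symm, h6.symm, h7.symm, h8.symm, h9.symm, h10.symm,
        PySem.Dict.get?]

theorem pvFF_eq_scan : ∀ cs : List Char, pvFF pvPairs cs = pvScanB pvTdictB cs := by
  have main : ∀ n cs, List.length cs ≤ n → pvFF pvPairs cs = pvScanB pvTdictB cs := by
    intro n
    induction n with
    | zero =>
      intro cs h
      have : cs = [] := List.length_eq_zero_iff.mp (Nat.le_zero.mp h)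
      subst this; rw [pvFF_nil_input]; rfl
    | succ n ih =>
      intro cs h
      match cs with
      | [] => rw [pvFF_nil_input]; rfl
      | [c] =>
        by_cases hc : c = '%'
        · subst hc; rw [pvFF_pct_nil]; rfl
        · rw [pvFF_cons_ne _ _ _ hc, pvFF_nil_input]; rfl
      | c :: c2 :: t =>
        by_cases hc : c = '%'
        · subst hc
          have hlt : t.length ≤ n := by simp at h; omega
          have hlt1 : (c2 :: t).length ≤ n := by simp at h ⊢; omega
          have key : ∀ (L1 L2 : List (Char × List Char)) (k : Char) (E : List Char) (v : String),
              pvPairs = L1 ++ (k, E) :: L2 → k ≠ '%' → (∀ p ∈ L1, k ≠ p.1) →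
              (∀ p ∈ L2, pvGood p.1 E = true) →
              pvTdictB.get? (String.ofList [k]) = some v → v.toList = E →
              pvFF pvPairs ('%' :: k :: t) = pvScanB pvTdictB ('%' :: k :: t) := by
            intro L1 L2 k E v hsplit hk h1 hg hget hv
            rw [pvScan_pos _ _ _ _ hget, hsplit, pvFF_match L1 L2 k E t hk h1 hg, ← hsplit,
                ih t hlt, hv]
          by_cases h2a : c2 = 'a'
          · subst h2a
            exact key (pvPairs.take 0) (pvPairs.drop 1) 'a' _ "[a-zA-Z]" rfl
              (by decide) (by decide) (by decide) rfl rfl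
          by_cases h2c : c2 = 'c'
          · subst h2c
            exact key (pvPairs.take 1) (pvPairs.drop 2) 'c' _ "[\\x00-\\x1f\\x7f]" rfl
              (by decide) (by decide) (by decide) rfl rfl
          by_cases h2d : c2 = 'd'
          · subst h2d
            exact key (pvPairs.take 2) (pvPairs.drop 3) 'd' _ "\\d" rfl
              (by decide) (by decide) (by decide) rfl rfl
          by_cases h2l : c2 = 'l'
          · subst h2l
            exact key (pvPairs.take 3) (pvPairs.drop 4) 'l' _ "[a-z]" rfl
              (by decide) (by decide) (by decide) rfl rfl
          by_cases h2u : c2 = 'u'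
          · subst h2u
            exact key (pvPairs.take 4) (pvPairs.drop 5) 'u' _ "[A-Z]" rfl
              (by decide) (by decide) (by decide) rfl rfl
          by_cases h2w : c2 = 'w'
          · subst h2w
            exact key (pvPairs.take 5) (pvPairs.drop 6) 'w' _ "\\w" rfl
              (by decide) (by decide) (by decide) rfl rfl
          by_cases h2x : c2 = 'x'
          · subst h2x
            exact key (pvPairs.take 6) (pvPairs.drop 7) 'x' _ "[a-fA-F0-9]" rfl
              (by decide) (by decide) (by decide) rfl rfl
          by_cases h2p : c2 = 'p'
          · subst h2p
            exact key (pvPairs.take 7) (pvPairs.drop 8) 'p' _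
              "[-!\\\"#$%&'()*+,./:;<=>?@[\\\\\\]^_`{|}~]" rfl
              (by decide) (by decide) (by decide) rfl rfl
          by_cases h2s : c2 = 's'
          · subst h2s
            exact key (pvPairs.take 8) (pvPairs.drop 9) 's' _ "\\s" rfl
              (by decide) (by decide) (by decide) rfl rfl
          by_cases h2z : c2 = 'z'
          · subst h2z
            exact key (pvPairs.take 9) (pvPairs.drop 10) 'z' _ "\\x00" rfl
              (by decide) (by decide) (by decide) rfl rfl
          by_cases h2pct : c2 = '%'
          · subst h2pct
            rw [pvScan_neg _ _ _ (by rfl)]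
            rw [pvFF_pct_gen pvPairs ('%' :: t) (by decide) (by decide)
                  (fun p hp c hcc => ?_) (fun c hcc => ?_), ih _ hlt1]
            · fin_cases hp <;> (simp at hcc; subst hcc; right; decide)
            · simp at hcc; subst hcc; left; rfl
          · rw [pvScan_neg _ _ _
                  (pvGet_none c2 ⟨h2a, h2c, h2d, h2l, h2u, h2w, h2x, h2p, h2s, h2z⟩),
                pvScan_cons_ne _ _ _ h2pct,
                pvFF_pct_other pvPairs c2 h2pct t (fun p hp => ?_), ih t hlt]
            fin_cases hp <;> simp_all
        · rw [pvFF_cons_ne _ _ _ hc, pvScan_cons_ne _ _ _ hc, ih _ (by simp at h ⊢; omega)]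
  intro cs; exact main cs.length cs le_rfl

theorem pvA_toList (s : String) :
    (lua_pattern_to_python_regex s).toList = pvFF pvPairs s.toList := by
  show (List.foldl _ s _).toList = _
  rw [show (PySem.Dict.ofList [
    ("%a", "[a-zA-Z]"),
    ("%c", "[\\x00-\\x1f\\x7f]"),
    ("%d", "\\d"),
    ("%l", "[a-z]"),
    ("%u", "[A-Z]"),
    ("%w", "\\w"),
    ("%x", "[a-fA-F0-9]"),
    ("%p", "[-!\\\"#$%&'()*+,./:;<=>?@[\\\\\\]^_`{|}~]"),
    ("%s", "\\s"),
    ("%z", "\\x00")] : PySem.Dict String String).items = [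
    ("%a", "[a-zA-Z]"),
    ("%c", "[\\x00-\\x1f\\x7f]"),
    ("%d", "\\d"),
    ("%l", "[a-z]"),
    ("%u", "[A-Z]"),
    ("%w", "\\w"),
    ("%x", "[a-fA-F0-9]"),
    ("%p", "[-!\\\"#$%&'()*+,./:;<=>?@[\\\\\\]^_`{|}~]"),
    ("%s", "\\s"),
    ("%z", "\\x00")] from rfl]
  simp only [List.foldl_cons, List.foldl_nil, PySem.Str.toList_replace]
  rw [show ("%a" : String).toList = ['%','a'] from rfl,
      show ("%c" : String).toList = ['%','c'] from rfl,
      show ("%d" : String).toList = ['%','d'] from rfl,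
      show ("%l" : String).toList = ['%','l'] from rfl,
      show ("%u" : String).toList = ['%','u'] from rfl,
      show ("%w" : String).toList = ['%','w'] from rfl,
      show ("%x" : String).toList = ['%','x'] from rfl,
      show ("%p" : String).toList = ['%','p'] from rfl,
      show ("%s" : String).toList = ['%','s'] from rfl,
      show ("%z" : String).toList = ['%','z'] from rfl]
  rw [show ("[a-zA-Z]" : String).toList = ['[','a','-','z','A','-','Z',']'] from rfl,
      show ("[\\x00-\\x1f\\x7f]" : String).toList = ['[','\\','x','0','0','-','\\','x','1','f','\\','x','7','f',']'] from rfl,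
      show ("\\d" : String).toList = ['\\','d'] from rfl,
      show ("[a-z]" : String).toList = ['[','a','-','z',']'] from rfl,
      show ("[A-Z]" : String).toList = ['[','A','-','Z',']'] from rfl,
      show ("\\w" : String).toList = ['\\','w'] from rfl,
      show ("[a-fA-F0-9]" : String).toList = ['[','a','-','f','A','-','F','0','-','9',']'] from rfl,
      show ("[-!\\\"#$%&'()*+,./:;<=>?@[\\\\\\]^_`{|}~]" : String).toList = ['[','-','!','\\','"','#','$','%','&','\'','(',')','*','+',',','.','/',':',';','<','=','>','?','@','[','\\','\\','\\',']','^','_','`','{','|','}','~',']'] from rfl,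
      show ("\\s" : String).toList = ['\\','s'] from rfl,
      show ("\\x00" : String).toList = ['\\','x','0','0'] from rfl]
  simp only [pvReplace_eq_repC]
  simp only [pvFF, pvPairs, List.foldl_cons, List.foldl_nil]

theorem pvB_toList (s : String) :
    (lua_pattern_to_python_regex_alt s).toList = pvScanB pvTdictB s.toList := by
  simp [lua_pattern_to_python_regex_alt]

-- ===== VERDICT (by name: the statement is the Claim_ definition above) =====
theorem lua_pattern_to_python_regex_spec : Claim_equal_lua_pattern_to_python_regex := by
  intro s _
  unfold Spec_lua_pattern_to_python_regex
  have h : (lua_pattern_to_python_regex s).toList = (lua_pattern_to_python_regex_alt s).toList := by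
    rw [pvA_toList, pvB_toList, pvFF_eq_scan]
  calc lua_pattern_to_python_regex s
      = String.ofList (lua_pattern_to_python_regex s).toList := by simp
    _ = String.ofList (lua_pattern_to_python_regex_alt s).toList := by rw [h]
    _ = lua_pattern_to_python_regex_alt s := by simp
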